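-- pv_equiv track=rewrite | github.com/camima2022/Project20-22 | AECM_clustering-Module-main/DataCollection_ISCX12.py | DataflowRegroup
-- ===== SOURCE A (Python) =====
-- def DataflowRegroup(payload, session, exchange_session):
--     index = 1
--     data_flow = []
--     count = int(len(session) - 1)
--
--     data_flow.append(payload[0])
--
--     while count > 0:
--         try:
--             if session[index][0:4] == session[index - 1][0:4]:  # single direction flow
--                 data_last = data_flow[-1]
--                 data_last = data_last + payload[index]
--                 data_flow[-1] = data_last
--             # elif session[index][0:4] == exchange_session[index - 1][0:4]:
--             #     data_flow.append(payload[index])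
--             else:
--                 data_flow.append(payload[index])
--             count -= 1
--             index += 1
--         except IndexError:
--             break
--     return data_flow
-- ===== SOURCE B (Python) =====
-- def DataflowRegroup(payload, session, exchange_session):
--     # Two-pass: collect group-start boundaries, then join payload segments.
--     L = min(len(session), len(payload))
--     bounds = [0]
--     for i in range(1, L):
--         if session[i][:4] != session[i - 1][:4]:
--             bounds.append(i)
--     bounds.append(max(L, 1))
--     return [''.join(payload[b:e]) for b, e in zip(bounds, bounds[1:])]
-- ===== Notes on version B (the rewrite author's own statement) =====
-- stated objective: alternative
-- what changed: Replaces A's single compare-and-mutate-last while loop (with try/except truncation and repeated string concatenation) by a two-pass scheme: one pass collects group-start boundary indices over the effective length min(len(session),len(payload)), a second pass joins the payload slice of each boundary segment with ''.join.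
-- outside the precondition, e.g. on DataflowRegroup([], ['abcd', 'abcd'], []): A raises IndexError, B returns ['']
import Mathlib
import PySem

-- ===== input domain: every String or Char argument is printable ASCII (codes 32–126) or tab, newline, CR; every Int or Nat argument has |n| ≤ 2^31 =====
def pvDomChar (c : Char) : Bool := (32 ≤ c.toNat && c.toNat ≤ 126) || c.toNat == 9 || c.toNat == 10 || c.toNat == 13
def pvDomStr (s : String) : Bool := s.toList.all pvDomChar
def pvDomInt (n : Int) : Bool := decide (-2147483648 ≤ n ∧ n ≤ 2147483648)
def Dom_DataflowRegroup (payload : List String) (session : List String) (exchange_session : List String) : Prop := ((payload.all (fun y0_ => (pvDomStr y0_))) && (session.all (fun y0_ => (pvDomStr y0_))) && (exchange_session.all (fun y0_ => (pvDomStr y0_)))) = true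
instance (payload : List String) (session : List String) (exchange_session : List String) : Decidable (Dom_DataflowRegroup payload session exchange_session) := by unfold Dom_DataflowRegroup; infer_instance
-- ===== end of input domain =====

-- B replaces A's compare-and-mutate-last while loop by a two-pass boundary-collection +
-- segment-join scheme; equivalence proved for nonempty payload (A raises IndexError on payload = []).


-- ===== PORT A =====
-- the while loop: fuel = initial count (the loop runs at most count times);
-- any IndexError inside the try (only payload[index] can actually be out of range) breaks the loop.
def pvLoopA (payload session : List String) : Nat → Int → List String → List String
  | 0, _, df => df
  | f + 1, index, df =>
    match PySem.List.pyGet? session index, PySem.List.pyGet? session (index - 1),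
          PySem.List.pyGet? payload index with
    | some si, some sp, some pi =>
      let df' :=
        if PySem.Str.slice si (some 0) (some 4) == PySem.Str.slice sp (some 0) (some 4) then
          -- data_flow[-1] = data_flow[-1] + payload[index]; data_flow is never empty here,
          -- so data_flow[-1] is ported as pyGetD with an unreachable default
          df.dropLast ++ [PySem.List.pyGetD df (-1) "" ++ pi]
        else
          df ++ [pi]
      pvLoopA payload session f (index + 1) df'
    | _, _, _ => df

def DataflowRegroup (payload : List String) (session : List String) (exchange_session : List String) : List String :=
  match PySem.List.pyGet? payload 0 with
  | none => []  -- payload[0] raises IndexError; excluded by Pre_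
  | some p0 => pvLoopA payload session ((session.length : Int) - 1).toNat 1 [p0]

-- ===== PORT B =====
def DataflowRegroup_alt (payload : List String) (session : List String) (exchange_session : List String) : List String :=
  let L : Int := min (session.length : Int) (payload.length : Int)
  let bounds :=
    ((PySem.List.pyRange 1 L 1).foldl
      (fun bs i =>
        if PySem.Str.slice (PySem.List.pyGetD session i "") (some 0) (some 4)
             != PySem.Str.slice (PySem.List.pyGetD session (i - 1) "") (some 0) (some 4)
        then bs ++ [i] else bs) [(0 : Int)])
    ++ [max L 1]
  (bounds.zip (PySem.List.slice bounds (some 1) none)).map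
    (fun be => PySem.Str.join "" (PySem.List.slice payload (some be.1) (some be.2)))

-- ===== PRECONDITION & SPEC =====
-- A evaluates payload[0] before the loop: on payload = [] it raises IndexError.
def Pre_DataflowRegroup (payload : List String) (session : List String) (exchange_session : List String) : Prop := payload ≠ []
instance (payload : List String) (session : List String) (exchange_session : List String) : Decidable (Pre_DataflowRegroup payload session exchange_session) := by unfold Pre_DataflowRegroup; infer_instance

def pvWitness_DataflowRegroup : List String × List String × List String :=
  (["aaaa1", "aaaa2", "bbbb3"], ["aaaaX", "aaaaY", "bbbbZ"], [])

def Spec_DataflowRegroup (payload : List String) (session : List String) (exchange_session : List String) (out : List String) : Prop := out = DataflowRegroup_alt payload session exchange_session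
instance (payload : List String) (session : List String) (exchange_session : List String) (out : List String) : Decidable (Spec_DataflowRegroup payload session exchange_session out) := by unfold Spec_DataflowRegroup; infer_instance

-- ===== CLAIM (what is proved, stated in full; the proofs are below) =====
def Claim_equal_DataflowRegroup : Prop := ∀ (payload : List String) (session : List String) (exchange_session : List String), Dom_DataflowRegroup payload session exchange_session → Pre_DataflowRegroup payload session exchange_session → Spec_DataflowRegroup payload session exchange_session (DataflowRegroup payload session exchange_session)

-- ===== LEMMAS AND PROOFS =====

theorem pvCharsJoin_append_singleton (xs : List (List Char)) (x : List Char) :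
    PySem.Chars.join [] (xs ++ [x]) = PySem.Chars.join [] xs ++ x := by
  induction xs with
  | nil => simp [PySem.Chars.join_nil, PySem.Chars.join_singleton]
  | cons a t ih =>
    cases t with
    | nil => simp [PySem.Chars.join_singleton, PySem.Chars.join_cons_cons]
    | cons b r =>
      simp only [List.cons_append, PySem.Chars.join_cons_cons]
      simp only [List.cons_append] at ih
      rw [ih]; simp

theorem pvJoin_nil_append_singleton (xs : List String) (x : String) :
    PySem.Str.join "" (xs ++ [x]) = PySem.Str.join "" xs ++ x := by
  apply String.toList_inj.mp
  simp only [String.toList_append, PySem.Str.toList_join, List.map_append, List.map_cons, List.map_nil]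
  have := pvCharsJoin_append_singleton (xs.map String.toList) x.toList
  simpa using this

theorem pvJoin_nil_singleton (x : String) : PySem.Str.join "" [x] = x := by
  simp [PySem.Str.join]

-- a payload segment [b, e) joined to one string
def pvSeg (payload : List String) (b e : Nat) : String :=
  PySem.Str.join "" ((payload.drop b).take (e - b))

theorem pvSeg_single (payload : List String) (i : Nat) (h : i < payload.length) :
    pvSeg payload i (i + 1) = payload.getD i "" := by
  unfold pvSeg
  rw [List.getD_eq_getElem _ _ h]
  have hd : payload.drop i = payload[i] :: payload.drop (i+1) := by
    rw [List.drop_eq_getElem_cons h]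
  have h1 : i + 1 - i = 1 := by omega
  rw [hd, h1]
  simp only [List.take_succ_cons, List.take_zero]
  exact pvJoin_nil_singleton _

theorem pvSeg_extend (payload : List String) (b i : Nat) (hb : b ≤ i) (h : i < payload.length) :
    pvSeg payload b (i + 1) = pvSeg payload b i ++ payload.getD i "" := by
  unfold pvSeg
  have h1 : i + 1 - b = (i - b) + 1 := by omega
  rw [h1, List.take_add_one]
  have h2 : (payload.drop b)[i - b]? = some payload[i] := by
    rw [List.getElem?_drop]
    rw [List.getElem?_eq_getElem (by omega)]
    congr 1; congr 1; omega
  rw [h2]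
  rw [List.getD_eq_getElem _ _ h]
  simp [pvJoin_nil_append_singleton]

-- the first 4 characters of session[i], the group key at index i
def pvKey (session : List String) (i : Nat) : String :=
  PySem.Str.slice (session.getD i "") (some 0) (some 4)

-- boundary test: a new group starts at index i
def pvBd (session : List String) (i : Nat) : Bool := pvKey session i != pvKey session (i - 1)

-- reference recursion both ports are reduced to
def pvGo (payload session : List String) (L : Nat) (i : Nat) (acc : String) : List String :=
  if i < L then
    if pvKey session i == pvKey session (i - 1) then
      pvGo payload session L (i + 1) (acc ++ payload.getD i "")
    else
      acc :: pvGo payload session L (i + 1) (payload.getD i "")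
  else [acc]
termination_by L - i

def pvSegs (payload : List String) (bs : List Nat) : List String :=
  (bs.zip bs.tail).map (fun be => pvSeg payload be.1 be.2)

theorem pvSegs_cons_cons (payload : List String) (a b : Nat) (r : List Nat) :
    pvSegs payload (a :: b :: r) = pvSeg payload a b :: pvSegs payload (b :: r) := rfl

-- A's while loop equals the reference recursion
theorem pvLoopA_eq_go (payload session : List String) (f i : Nat) (pre : List String)
    (acc : String) (h1 : 1 ≤ i) (h2 : i + f = max session.length 1) :
    pvLoopA payload session f (i : Int) (pre ++ [acc]) =
      pre ++ pvGo payload session (min session.length payload.length) i acc := by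
  induction f generalizing i pre acc with
  | zero =>
    rw [pvGo]
    rw [if_neg (by omega)]
    rfl
  | succ g ih =>
    have hi : i < session.length := by omega
    have hget_i : PySem.List.pyGet? session (i : Int) = some (session.getD i "") := by
      simp [PySem.List.pyGet?_natCast, List.getD_eq_getElem?_getD,
        List.getElem?_eq_getElem hi]
    have hcast : ((i : Int) - 1) = ((i - 1 : Nat) : Int) := by omega
    have hget_i1 : PySem.List.pyGet? session ((i : Int) - 1) = some (session.getD (i-1) "") := by
      rw [hcast]
      simp [PySem.List.pyGet?_natCast, List.getD_eq_getElem?_getD,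
        List.getElem?_eq_getElem (show i - 1 < session.length by omega)]
    rw [pvLoopA, hget_i, hget_i1]
    by_cases hp : i < payload.length
    · have hgp : PySem.List.pyGet? payload (i : Int) = some (payload.getD i "") := by
        simp [PySem.List.pyGet?_natCast, List.getD_eq_getElem?_getD,
          List.getElem?_eq_getElem hp]
      rw [hgp]
      rw [pvGo, if_pos (by omega)]
      simp only []
      by_cases hk : pvKey session i == pvKey session (i - 1)
      · rw [if_pos (show (PySem.Str.slice (session.getD i "") (some 0) (some 4) ==
            PySem.Str.slice (session.getD (i-1) "") (some 0) (some 4)) = true from hk),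
          if_pos hk]
        have hdf : (pre ++ [acc]).dropLast ++
            [PySem.List.pyGetD (pre ++ [acc]) (-1) "" ++ payload.getD i ""] =
            pre ++ [acc ++ payload.getD i ""] := by
          rw [List.dropLast_concat, PySem.List.pyGetD_neg_one_append_singleton]
        rw [hdf]
        have := ih (i + 1) pre (acc ++ payload.getD i "") (by omega) (by omega)
        exact_mod_cast this
      · rw [if_neg (by simpa using hk), if_neg (by simpa using hk)]
        have h4 := ih (i + 1) (pre ++ [acc]) (payload.getD i "") (by omega) (by omega)
        simp only [List.append_assoc, List.singleton_append] at h4 ⊢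
        exact_mod_cast h4
    · have hgp : PySem.List.pyGet? payload (i : Int) = none := by
        simp only [PySem.List.pyGet?_natCast]
        exact List.getElem?_eq_none (by omega)
      rw [hgp, pvGo, if_neg (by omega)]

-- B's boundary-segment output equals the reference recursion
theorem pvSegs_eq_go (payload session : List String) (L : Nat)
    (hL : L = min session.length payload.length) :
    ∀ (n i b : Nat), L - i = n → 1 ≤ i → i ≤ L → b < i →
      pvSegs payload (b :: (List.range' i (L - i)).filter (pvBd session) ++ [L]) =
        pvGo payload session L i (pvSeg payload b i) := by
  intro n
  induction n with
  | zero =>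
    intro i b hn h1 h2 hb
    have hiL : i = L := by omega
    rw [hn]
    simp only [List.range'_zero, List.filter_nil]
    rw [pvGo, if_neg (by omega)]
    subst hiL
    rfl
  | succ m ih =>
    intro i b hn h1 h2 hb
    have hiL : i < L := by omega
    have hip : i < payload.length := by omega
    rw [hn, show m + 1 = (L - (i+1)) + 1 by omega, List.range'_succ,
      List.filter_cons]
    rw [pvGo, if_pos hiL]
    by_cases hbd : pvBd session i
    · rw [if_pos hbd]
      have hkne : (pvKey session i == pvKey session (i - 1)) = false := by
        simpa [pvBd] using hbd
      rw [hkne]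
      simp only [Bool.false_eq_true, if_false]
      rw [show (b :: (i :: List.filter (pvBd session) (List.range' (i + 1) (L - (i + 1)))) ++ [L] : List Nat) = b :: i :: (List.filter (pvBd session) (List.range' (i + 1) (L - (i + 1))) ++ [L]) from rfl]
      rw [pvSegs_cons_cons payload b i (List.filter (pvBd session) (List.range' (i+1) (L - (i+1))) ++ [L])]
      have := ih (i + 1) i (by omega) (by omega) (by omega) (by omega)
      rw [List.cons_append] at this
      rw [this, pvSeg_single payload i hip]
    · rw [if_neg (by simpa using hbd)]
      have hkeq : (pvKey session i == pvKey session (i - 1)) = true := by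
        simpa [pvBd] using hbd
      rw [hkeq]
      simp only [if_true]
      have := ih (i + 1) b (by omega) (by omega) (by omega) (by omega)
      rw [List.cons_append] at this
      rw [show ((b :: List.filter (pvBd session) (List.range' (i + 1) (L - (i + 1)))) ++ [L] : List Nat) = b :: (List.filter (pvBd session) (List.range' (i + 1) (L - (i + 1))) ++ [L]) from rfl]
      rw [this, pvSeg_extend payload b i (by omega) hip]

theorem pvRange_cast (n : Nat) :
    PySem.List.pyRange 1 (n : Int) 1 = (List.range' 1 (n - 1)).map (Nat.cast) := by
  rw [PySem.List.pyRange_one, List.range'_eq_map_range, List.map_map]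
  rw [show ((n : Int) - 1).toNat = n - 1 by omega]
  apply List.map_congr_left
  intro k _
  simp only [Function.comp_apply]
  push_cast
  ring

-- B's port reduced to pvSegs of the Nat boundary list
theorem pvAlt_eq_segs (payload session exchange_session : List String) (hs : 1 ≤ session.length)
    (hp : 1 ≤ payload.length) :
    DataflowRegroup_alt payload session exchange_session =
      pvSegs payload ((0 :: (List.range' 1 (min session.length payload.length - 1)).filter
        (pvBd session)) ++ [min session.length payload.length]) := by
  unfold DataflowRegroup_alt
  simp only []
  have hLnat : min ((session.length : Nat) : Int) ((payload.length : Nat) : Int) =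
      ((min session.length payload.length : Nat) : Int) := by omega
  set Ln := min session.length payload.length with hLn
  have hL1 : 1 ≤ Ln := by omega
  rw [hLnat, PySem.List.foldl_append_if
    (fun i => PySem.Str.slice (PySem.List.pyGetD session i "") (some 0) (some 4)
      != PySem.Str.slice (PySem.List.pyGetD session (i - 1) "") (some 0) (some 4))
    (fun x => x)]
  rw [pvRange_cast, List.filter_map]
  rw [List.filter_congr (q := fun j => pvBd session j) ?_]
  · rw [show max ((Ln : Nat) : Int) 1 = ((Ln : Nat) : Int) by omega]
    rw [List.map_id']
    rw [show ([(0:Int)] ++ (((List.range' 1 (Ln-1)).filter (pvBd session)).map Nat.cast)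
          ++ [((Ln : Nat) : Int)] : List Int)
        = ((0 :: (List.range' 1 (Ln-1)).filter (pvBd session)) ++ [Ln]).map Nat.cast by
      simp]
    rw [PySem.List.slice_from_one, ← List.map_tail, List.zip_map, List.map_map]
    unfold pvSegs
    apply List.map_congr_left
    intro be _
    simp only [Function.comp, Prod.map]
    rw [PySem.List.slice_natCast]
    rfl
  · intro j hj
    rw [List.mem_range'] at hj
    simp only [Function.comp]
    rw [PySem.List.pyGetD_natCast]
    rw [show ((j : Int) - 1) = (((j - 1 : Nat)) : Int) by omega]
    rw [PySem.List.pyGetD_natCast]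
    rfl

theorem pvPorts_agree (payload session exchange_session : List String) (hp : payload ≠ []) :
    DataflowRegroup payload session exchange_session =
      DataflowRegroup_alt payload session exchange_session := by
  obtain ⟨p0, ps, rfl⟩ := List.exists_cons_of_ne_nil hp
  have hp1 : 1 ≤ (p0 :: ps).length := by simp
  have hA : DataflowRegroup (p0 :: ps) session exchange_session =
      pvLoopA (p0 :: ps) session ((session.length : Int) - 1).toNat 1 [p0] := by
    unfold DataflowRegroup
    rw [PySem.List.pyGet?_zero_cons]
  rw [hA]
  by_cases hs : session.length = 0
  · have hsess : session = [] := List.length_eq_zero_iff.mp hs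
    subst hsess
    simp only [List.length_nil]
    rw [show (((0:Nat) : Int) - 1).toNat = 0 by decide]
    rw [show pvLoopA (p0 :: ps) [] 0 1 [p0] = [p0] from rfl]
    clear hA
    unfold DataflowRegroup_alt
    simp only [List.length_nil]
    rw [show min (((0:Nat):Int)) (((p0::ps).length : Int)) = 0 by omega]
    rw [PySem.List.pyRange_one_eq_nil (by omega)]
    simp only [List.foldl_nil]
    rw [show max (0:Int) 1 = 1 by decide]
    rw [PySem.List.slice_from_one]
    simp only [List.nil_append, List.cons_append]
    simp only [List.zip_cons_cons, List.tail_cons, List.zip_nil_right, List.map_cons, List.map_nil]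
    have hsl : PySem.List.slice (p0 :: ps) (some (0:Int)) (some 1) = [p0] := by
      rw [PySem.List.slice_zero_start, PySem.List.slice_to _ (by decide)]
      rfl
    rw [hsl, pvJoin_nil_singleton]
  · have hs1 : 1 ≤ session.length := by omega
    rw [pvAlt_eq_segs _ _ _ hs1 hp1]
    have hLn1 : 1 ≤ min session.length (p0 :: ps).length := by
      simp only [List.length_cons]; omega
    have hsegs := pvSegs_eq_go (p0 :: ps) session (min session.length (p0 :: ps).length) rfl
      (min session.length (p0 :: ps).length - 1) 1 0 (by omega) (by omega) (by omega) (by omega)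
    rw [hsegs]
    have hloop := pvLoopA_eq_go (p0 :: ps) session (session.length - 1) 1 [] p0
      (by omega) (by omega)
    rw [show (((session.length : Nat) : Int) - 1).toNat = session.length - 1 by omega]
    rw [show ((1:Nat) : Int) = (1 : Int) by rfl] at hloop
    rw [show ([] ++ [p0] : List String) = [p0] by rfl] at hloop
    rw [hloop, List.nil_append]
    congr 1
    rw [show (1:Nat) = 0 + 1 by rfl, pvSeg_single (p0 :: ps) 0 (by simp)]
    rfl

-- ===== VERDICT (by name: the statement is the Claim_ definition above) =====
theorem DataflowRegroup_spec : Claim_equal_DataflowRegroup := by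
  intro payload session exchange_session _ hpre
  exact pvPorts_agree payload session exchange_session hpre
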